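-- pv_equiv track=rewrite | github.com/bchwast/AGH-ASD | Ćwiczenia 7/trains.py | trains
-- ===== SOURCE A (Python) =====
-- from queue import PriorityQueue
--
-- def trains(A, m):
--     n = len(A)
--     Q = PriorityQueue(m)
--     for i in range(m):
--         Q.put(A[i][1])
--
--     for i in range(m + 1, n):
--         top = Q.get()
--         if A[i][0] < top:
--             return False
--         else:
--             Q.put(A[i][1])
--
--     return True
-- ===== SOURCE B (Python) =====
-- def trains(A, m):
--     dep = [d for _, d in A[:m]]
--     for a, d in A[m + 1:]:
--         top = min(dep)
--         if a < top:
--             return False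
--         dep[dep.index(top)] = d
--     return True
-- ===== Notes on version B (the rewrite author's own statement) =====
-- stated objective: simpler
-- what changed: Replaces the PriorityQueue and index-range loops with plain list slices iterated directly, keeping pending departures in an unordered list whose minimum is re-found by a linear min() scan and overwritten in place instead of popped/pushed through a heap.
import Mathlib
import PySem

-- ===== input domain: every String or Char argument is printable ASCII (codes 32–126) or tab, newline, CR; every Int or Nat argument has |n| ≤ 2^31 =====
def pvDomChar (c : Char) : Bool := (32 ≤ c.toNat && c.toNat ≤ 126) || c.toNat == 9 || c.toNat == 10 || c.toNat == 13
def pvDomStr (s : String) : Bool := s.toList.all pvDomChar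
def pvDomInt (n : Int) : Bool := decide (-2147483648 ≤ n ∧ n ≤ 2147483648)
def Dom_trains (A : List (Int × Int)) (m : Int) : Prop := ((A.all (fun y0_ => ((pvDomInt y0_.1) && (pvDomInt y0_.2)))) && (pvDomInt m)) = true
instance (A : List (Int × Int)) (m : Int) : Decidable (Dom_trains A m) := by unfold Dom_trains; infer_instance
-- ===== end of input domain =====

-- B drops the priority queue and the index loops: it slices the list and keeps pending
-- departures in an unordered list, re-finding the minimum by a linear scan and
-- overwriting it in place. Objective: simpler; not faster.

-- ===== PORT A =====
-- The PriorityQueue is modelled as a sorted list: put = orderedInsert, get = head.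
-- Second loop of A: early return needs recursion over the remaining indices.
def trainsLoopA (A : List (Int × Int)) : List Int → List Int → Bool
  | _, [] => true
  | Q, i :: rest =>
    let top := Q.headD 0                    -- Q.get(); empty queue unreachable under Pre_
    let Q' := Q.tail
    match PySem.List.pyGet? A i with
    | none => false                         -- IndexError, unreachable under Pre_
    | some p =>
      if p.1 < top then false
      else trainsLoopA A (List.orderedInsert (· ≤ ·) p.2 Q') rest

def trains (A : List (Int × Int)) (m : Int) : Bool :=
  let n : Int := A.length
  let Q := (PySem.List.pyRange 0 m 1).foldl
    (fun q i => match PySem.List.pyGet? A i with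
                | none => q                 -- IndexError, unreachable under Pre_
                | some p => List.orderedInsert (· ≤ ·) p.2 q) []
  trainsLoopA A Q (PySem.List.pyRange (m + 1) n 1)

-- ===== PORT B =====
-- Loop of B: iterates the slice A[m+1:] directly, state = the unordered dep list.
def trainsLoopB : List Int → List (Int × Int) → Bool
  | _, [] => true
  | dep, p :: rest =>
    let top := (PySem.List.min? dep (fun x => x)).getD 0   -- min(dep); empty unreachable under Pre_
    if p.1 < top then false
    else
      let dep' := match PySem.List.index? dep top with
        | some j => dep.set j p.2           -- dep[dep.index(top)] = d
        | none => dep                       -- ValueError, unreachable: top = min(dep) ∈ dep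
      trainsLoopB dep' rest

def trains_alt (A : List (Int × Int)) (m : Int) : Bool :=
  let dep := (PySem.List.slice A none (some m)).map Prod.snd   -- [d for _, d in A[:m]]
  trainsLoopB dep (PySem.List.slice A (some (m + 1)) none)     -- for a, d in A[m+1:]

-- ===== PRECONDITION & SPEC =====
-- Pre_ = exactly the inputs on which the Python A returns: m > len(A) raises IndexError in the
-- first loop, and m ≤ 0 with len(A) ≥ m+2 makes the empty-queue Q.get() block forever.
def Pre_trains (A : List (Int × Int)) (m : Int) : Prop :=
  (1 ≤ m ∧ m ≤ A.length) ∨ (m ≤ 0 ∧ (A.length : Int) ≤ m + 1)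
instance (A : List (Int × Int)) (m : Int) : Decidable (Pre_trains A m) := by
  unfold Pre_trains; infer_instance

def pvWitness_trains : (List (Int × Int)) × Int := ([(1, 3), (2, 5), (4, 6)], 2)

def Spec_trains (A : List (Int × Int)) (m : Int) (out : Bool) : Prop := out = trains_alt A m
instance (A : List (Int × Int)) (m : Int) (out : Bool) : Decidable (Spec_trains A m out) := by unfold Spec_trains; infer_instance

-- ===== CLAIM (what is proved, stated in full; the proofs are below) =====
def Claim_equal_trains : Prop := ∀ (A : List (Int × Int)) (m : Int), Dom_trains A m → Pre_trains A m → Spec_trains A m (trains A m)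

-- ===== LEMMAS AND PROOFS =====

-- the head of a sorted list is the (unique) minimum value of any permutation of it
lemma min?_of_perm_sorted {q0 : Int} {qt dep : List Int}
    (hs : (q0 :: qt).Pairwise (· ≤ ·)) (hp : (q0 :: qt).Perm dep) :
    PySem.List.min? dep (fun x => x) = some q0 := by
  rcases hx : PySem.List.min? dep (fun x => x) with _ | x
  · rw [PySem.List.min?_eq_none_iff] at hx
    subst hx
    exact absurd hp.symm (by simp)
  · have hmem : x ∈ q0 :: qt := hp.symm.subset (PySem.List.min?_mem hx)
    have h1 : x ≤ q0 := PySem.List.min?_isMin hx q0 (hp.subset (by simp))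
    have h2 : q0 ≤ x := by
      rcases List.mem_cons.mp hmem with h | h
      · omega
      · exact (List.pairwise_cons.mp hs).1 x h
    exact congrArg some (le_antisymm h1 h2)

-- replacing the first occurrence of v in place is, up to permutation, erasing v and consing d
lemma set_index?_perm {dep : List Int} {v d : Int} {j : Nat}
    (hj : PySem.List.index? dep v = some j) :
    (dep.set j d).Perm (d :: dep.erase v) := by
  induction dep generalizing j with
  | nil => simp [PySem.List.index?_eq_idxOf?] at hj
  | cons x xs ih =>
    by_cases hx : x = v
    · subst hx
      rw [PySem.List.index?_cons_self] at hj
      cases hj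
      simp [List.erase_cons_head]
    · rw [PySem.List.index?_cons_of_ne xs hx] at hj
      rcases Option.map_eq_some_iff.mp hj with ⟨k, hk, rfl⟩
      rw [List.erase_cons_tail (by simp [hx])]
      exact ((ih hk).cons x).trans (List.Perm.swap d x _)

-- the two loops agree: A walks indices k..len-1 with a sorted queue, B walks A.drop k
-- with any permutation of it (the queue stays nonempty, so the empty branches never fire)
lemma loops_eq (A : List (Int × Int)) :
    ∀ (fuel k : Nat) (Q dep : List Int), A.length ≤ k + fuel → Q ≠ [] →
      Q.Pairwise (· ≤ ·) → Q.Perm dep →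
      trainsLoopA A Q (PySem.List.pyRange k A.length 1) = trainsLoopB dep (A.drop k) := by
  intro fuel
  induction fuel with
  | zero =>
    intro k Q dep hle _ _ _
    rw [PySem.List.pyRange_one_eq_nil (by exact_mod_cast hle),
        List.drop_eq_nil_of_le (by omega)]
    rfl
  | succ f ih =>
    intro k Q dep hle hne hs hp
    by_cases hk : k < A.length
    · rw [PySem.List.pyRange_one_cons (by exact_mod_cast hk),
          ← List.getElem_cons_drop (as := A) (h := hk)]
      rcases Q with _ | ⟨q0, qt⟩
      · exact absurd rfl hne
      · have htop : PySem.List.min? dep (fun x => x) = some q0 := min?_of_perm_sorted hs hp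
        have hmem : q0 ∈ dep := hp.subset (by simp)
        rcases hj : PySem.List.index? dep q0 with _ | j
        · rw [PySem.List.index?_eq_none_iff] at hj; exact absurd hmem hj
        · have hperm : (dep.set j A[k].2).Perm (List.orderedInsert (· ≤ ·) A[k].2 qt) := by
            refine (set_index?_perm hj).trans ?_
            refine (List.Perm.cons A[k].2 ?_).trans (List.perm_orderedInsert _ _ _).symm
            have := hp.symm.erase q0
            rwa [List.erase_cons_head] at this
          simp only [trainsLoopA, trainsLoopB, List.headD, List.tail, htop, Option.getD_some,
            PySem.List.pyGet?_natCast, List.getElem?_eq_getElem hk, hj]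
          by_cases hlt : A[k].1 < q0
          · simp [hlt]
          · simp only [hlt, if_false]
            have : (k : Int) + 1 = ((k + 1 : Nat) : Int) := by push_cast; ring
            rw [this]
            exact ih (k + 1) _ _ (by omega)
              (by
                intro h
                have hlen := congrArg List.length h
                rw [List.orderedInsert_length] at hlen
                simp at hlen)
              (List.Pairwise.orderedInsert A[k].2 qt hs.of_cons)
              hperm.symm
    · rw [PySem.List.pyRange_one_eq_nil (by exact_mod_cast Nat.le_of_not_lt hk),
          List.drop_eq_nil_of_le (by omega)]
      rfl

-- A's build loop produces a sorted permutation of the departures of A[:m]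
lemma build_perm_sorted (A : List (Int × Int)) :
    ∀ (mk : Nat), mk ≤ A.length →
      ((PySem.List.pyRange 0 (mk : Int) 1).foldl
        (fun q i => match PySem.List.pyGet? A i with
                    | none => q
                    | some p => List.orderedInsert (· ≤ ·) p.2 q) []).Pairwise (· ≤ ·) ∧
      ((PySem.List.pyRange 0 (mk : Int) 1).foldl
        (fun q i => match PySem.List.pyGet? A i with
                    | none => q
                    | some p => List.orderedInsert (· ≤ ·) p.2 q) []).Perm
        ((A.take mk).map Prod.snd) := by
  intro mk
  induction mk with
  | zero => intro _; simp [PySem.List.pyRange_one_eq_nil]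
  | succ j ih =>
    intro hle
    have hj : j < A.length := by omega
    rcases ih (by omega) with ⟨hs, hp⟩
    have hrange : PySem.List.pyRange 0 ((j + 1 : Nat) : Int) 1 =
        PySem.List.pyRange 0 (j : Int) 1 ++ [(j : Int)] := by
      have : ((j + 1 : Nat) : Int) = (j : Int) + 1 := by push_cast; ring
      rw [this, PySem.List.pyRange_one_succ_right (by positivity)]
    rw [hrange, List.foldl_append]
    simp only [List.foldl_cons, List.foldl_nil, PySem.List.pyGet?_natCast,
      List.getElem?_eq_getElem hj]
    refine ⟨List.Pairwise.orderedInsert _ _ hs, ?_⟩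
    have htake : (A.take (j + 1)).map Prod.snd = (A.take j).map Prod.snd ++ [A[j].2] := by
      rw [List.take_add_one, List.getElem?_eq_getElem hj]
      simp only [Option.toList_some, List.map_append, List.map_cons, List.map_nil]
    rw [htake]
    exact (List.perm_orderedInsert _ _ _).trans
      ((hp.cons A[j].2).trans (List.perm_append_singleton _ _).symm)

-- ===== VERDICT (by name: the statement is the Claim_ definition above) =====
theorem trains_spec : Claim_equal_trains := by
  intro A m _ hpre
  unfold Spec_trains
  rcases hpre with ⟨h1, h2⟩ | ⟨h1, h2⟩
  · -- 1 ≤ m ≤ len: real run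
    obtain ⟨mk, rfl⟩ : ∃ mk : Nat, (mk : Int) = m := ⟨m.toNat, Int.toNat_of_nonneg (by omega)⟩
    have hmk : mk ≤ A.length := by exact_mod_cast h2
    rcases build_perm_sorted A mk hmk with ⟨hs, hp⟩
    have hne : ((A.take mk).map Prod.snd) ≠ [] := by
      simp only [ne_eq, List.map_eq_nil_iff, List.take_eq_nil_iff, not_or]
      refine ⟨by omega, fun hA => ?_⟩
      subst hA; simp at hmk; omega
    have hcast : (mk : Int) + 1 = ((mk + 1 : Nat) : Int) := by push_cast; ring
    show trains A (mk : Int) = trains_alt A (mk : Int)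
    unfold trains trains_alt
    simp only [hcast, PySem.List.slice_from_natCast, PySem.List.slice_to_natCast]
    exact loops_eq A A.length (mk + 1) _ _ (by omega)
      (fun h => hne (h ▸ hp).nil_eq.symm) hs hp
  · -- m ≤ 0 and len ≤ m+1: both loops are empty, both return True
    have hnil : PySem.List.pyRange (m + 1) (A.length : Int) 1 = [] :=
      PySem.List.pyRange_one_eq_nil (by omega)
    have hslice : PySem.List.slice A (some (m + 1)) none = [] := by
      have h0 : (0 : Int) ≤ m + 1 := by omega
      rw [PySem.List.slice_from A h0]
      exact List.drop_eq_nil_of_le (by omega)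
    show trains A m = trains_alt A m
    unfold trains trains_alt
    simp only [hnil, hslice]
    rfl
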